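-- pv_equiv track=rewrite | github.com/regorand/bfCompiler | bfc.py | buildNumber
-- ===== SOURCE A (Python) =====
-- import math
--
-- def buildNumber(value, isBase = True):
-- 	result = ''
-- 	if(value < 10):
-- 		for i in range(0, value):
-- 			result+='+'
-- 	else:
-- 		floorRoot = int(math.sqrt(value))
-- 		remainder = value - (floorRoot * floorRoot)
-- 		for i in range(0, floorRoot):
-- 			result += '+'
-- 		result += '[->'
-- 		for i in range(0, floorRoot):
-- 			result += '+'
-- 		result += '<]'
-- 		if(remainder != 0):
-- 			result += buildNumber(remainder, False)
-- 		if(isBase):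
-- 			result += '>[-<+>]<'
-- 	return result
-- ===== SOURCE B (Python) =====
-- import math
--
-- def buildNumber(value, isBase = True):
-- 	parts = []
-- 	cur = value
-- 	while True:
-- 		if cur < 10:
-- 			parts.append('+' * cur)
-- 			break
-- 		fr = math.isqrt(cur)
-- 		rem = cur - fr * fr
-- 		parts.append('+' * fr + '[->' + '+' * fr + '<]')
-- 		if rem == 0:
-- 			break
-- 		cur = rem
-- 	if isBase and value >= 10:
-- 		parts.append('>[-<+>]<')
-- 	return ''.join(parts)
-- ===== Notes on version B (the rewrite author's own statement) =====
-- stated objective: alternative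
-- what changed: A's tail recursion on the remainder (with the isBase flag threading the suffix) is replaced by an iterative while-loop that collects string parts in a list, appends the '>[-<+>]<' suffix once iff isBase and value >= 10, and joins the parts at the end.
import Mathlib
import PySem

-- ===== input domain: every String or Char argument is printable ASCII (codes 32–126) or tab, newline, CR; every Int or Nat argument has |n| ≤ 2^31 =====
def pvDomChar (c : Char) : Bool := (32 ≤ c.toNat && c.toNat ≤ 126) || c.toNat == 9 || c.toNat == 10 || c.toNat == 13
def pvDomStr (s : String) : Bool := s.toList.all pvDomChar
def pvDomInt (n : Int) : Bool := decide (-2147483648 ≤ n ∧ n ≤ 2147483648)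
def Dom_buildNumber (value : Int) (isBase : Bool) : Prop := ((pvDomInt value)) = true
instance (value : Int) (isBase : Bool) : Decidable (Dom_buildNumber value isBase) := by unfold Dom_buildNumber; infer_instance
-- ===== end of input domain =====

-- B replaces A's tail recursion (recursive call on the remainder, suffix handled via the
-- isBase flag) by one iterative loop collecting string parts, joined at the end
-- (objective: alternative decomposition; same asymptotic cost).

-- ===== PORT A =====
-- termination: the recursive call is on remainder = value - ⌊√value⌋², which is smaller
def pvRemainder_lt (value : Int) (h : ¬ value < 10) :
    (value - Int.sqrt value * Int.sqrt value).toNat < value.toNat := by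
  have hv : (10 : Int) ≤ value := by omega
  have h1 : (Nat.sqrt value.toNat) * (Nat.sqrt value.toNat) ≤ value.toNat := by
    have h0 := Nat.sqrt_le' value.toNat
    rwa [pow_two] at h0
  have h3 : 3 ≤ Nat.sqrt value.toNat := Nat.le_sqrt'.mpr (by omega)
  have h9 : 9 ≤ (Nat.sqrt value.toNat) * (Nat.sqrt value.toNat) := Nat.mul_le_mul h3 h3
  have h1' : ((Nat.sqrt value.toNat : Nat) : Int) * ((Nat.sqrt value.toNat : Nat) : Int) ≤ value := by
    have := (Int.ofNat_le.mpr h1)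
    push_cast at this
    omega
  have h9' : (9 : Int) ≤ ((Nat.sqrt value.toNat : Nat) : Int) * ((Nat.sqrt value.toNat : Nat) : Int) := by
    have := (Int.ofNat_le.mpr h9)
    push_cast at this
    omega
  have hs : Int.sqrt value = ((Nat.sqrt value.toNat : Nat) : Int) := rfl
  rw [hs]
  omega

-- `int(math.sqrt(value))` is ported as `Int.sqrt`: math.sqrt is correctly rounded, and for
-- 10 ≤ value ≤ 2^31 (< 2^52) truncating it equals the integer square root.
def buildNumber (value : Int) (isBase : Bool) : String :=
  if h : value < 10 then
    (PySem.List.pyRange 0 value 1).foldl (fun r _ => r ++ "+") ""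
  else
    let floorRoot : Int := Int.sqrt value
    let remainder : Int := value - floorRoot * floorRoot
    let r1 := (PySem.List.pyRange 0 floorRoot 1).foldl (fun r _ => r ++ "+") ""
    let r2 := r1 ++ "[->"
    let r3 := (PySem.List.pyRange 0 floorRoot 1).foldl (fun r _ => r ++ "+") r2
    let r4 := r3 ++ "<]"
    let r5 := if remainder ≠ 0 then r4 ++ buildNumber remainder false else r4
    if isBase then r5 ++ ">[-<+>]<" else r5
termination_by value.toNat
decreasing_by exact pvRemainder_lt value h

-- ===== PORT B =====
-- '+' * n  (empty for n ≤ 0, as in Python)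
def pvPlus (n : Int) : String := String.ofList (List.replicate n.toNat '+')

-- the while-True loop of Source B: appends parts, continues on cur = rem
def pvBLoop (cur : Int) (parts : List String) : List String :=
  if h : cur < 10 then parts ++ [pvPlus cur]
  else
    let fr : Int := Int.sqrt cur   -- math.isqrt(cur)
    let rem : Int := cur - fr * fr
    let parts2 := parts ++ [pvPlus fr ++ "[->" ++ pvPlus fr ++ "<]"]
    if rem = 0 then parts2 else pvBLoop rem parts2
termination_by cur.toNat
decreasing_by exact pvRemainder_lt cur h

def buildNumber_alt (value : Int) (isBase : Bool) : String :=
  let parts := pvBLoop value []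
  let parts := if isBase && decide (10 ≤ value) then parts ++ [">[-<+>]<"] else parts
  String.join parts

-- ===== PRECONDITION & SPEC =====
def Spec_buildNumber (value : Int) (isBase : Bool) (out : String) : Prop := out = buildNumber_alt value isBase
instance (value : Int) (isBase : Bool) (out : String) : Decidable (Spec_buildNumber value isBase out) := by unfold Spec_buildNumber; infer_instance

-- ===== CLAIM (what is proved, stated in full; the proofs are below) =====
def Claim_equal_buildNumber : Prop := ∀ (value : Int) (isBase : Bool), Dom_buildNumber value isBase → Spec_buildNumber value isBase (buildNumber value isBase)

-- ===== LEMMAS AND PROOFS =====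

theorem foldl_plus (l : List Int) (r : String) :
    l.foldl (fun r _ => r ++ "+") r = r ++ String.ofList (List.replicate l.length '+') := by
  induction l generalizing r with
  | nil => simp
  | cons a t ih =>
    simp only [List.foldl_cons, List.length_cons, ih]
    rw [String.append_assoc]
    congr 1
    rw [List.replicate_succ, ← List.singleton_append, String.ofList_append]

theorem foldl_plus_range (n : Int) (r : String) :
    (PySem.List.pyRange 0 n 1).foldl (fun r _ => r ++ "+") r = r ++ pvPlus n := by
  rw [foldl_plus]
  simp [pvPlus, PySem.List.length_pyRange_one]

theorem strcat_foldl (l : List String) (r : String) :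
    l.foldl (· ++ ·) r = r ++ l.foldl (· ++ ·) "" := by
  induction l generalizing r with
  | nil => simp only [List.foldl_nil]; rw [String.append_empty]
  | cons a t ih =>
    simp only [List.foldl_cons]
    rw [ih (r ++ a), ih ("" ++ a), String.empty_append, String.append_assoc]

theorem join_eq (l : List String) : String.join l = l.foldl (· ++ ·) "" := rfl

theorem join_nil : String.join [] = "" := rfl

theorem join_cons (s : String) (l : List String) :
    String.join (s :: l) = s ++ String.join l := by
  rw [join_eq, join_eq, List.foldl_cons, strcat_foldl, String.empty_append]

theorem join_append (l1 l2 : List String) :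
    String.join (l1 ++ l2) = String.join l1 ++ String.join l2 := by
  rw [join_eq, join_eq, join_eq, List.foldl_append, strcat_foldl]

theorem pvBLoop_acc (cur : Int) (parts : List String) :
    pvBLoop cur parts = parts ++ pvBLoop cur [] := by
  by_cases h : cur < 10
  · rw [pvBLoop, pvBLoop]; simp [h]
  · rw [pvBLoop, pvBLoop]
    simp only [h, dite_false]
    by_cases hr : cur - Int.sqrt cur * Int.sqrt cur = 0
    · simp [hr]
    · simp only [hr, if_false]
      rw [pvBLoop_acc _ (parts ++ _), pvBLoop_acc _ ([] ++ _)]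
      simp
termination_by cur.toNat
decreasing_by all_goals exact pvRemainder_lt cur h

-- core: A with isBase = False equals the joined loop parts
theorem core_eq (v : Int) : buildNumber v false = String.join (pvBLoop v []) := by
  by_cases h : v < 10
  · rw [buildNumber, pvBLoop]
    simp [h, foldl_plus_range, join_cons, join_nil]
  · rw [buildNumber, pvBLoop]
    simp only [h, dite_false, if_false, Bool.false_eq_true]
    rw [foldl_plus_range, foldl_plus_range]
    by_cases hr : v - Int.sqrt v * Int.sqrt v = 0
    · simp [hr, join_cons, join_nil, String.append_assoc, String.empty_append,
        String.append_empty]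
    · simp only [hr, ne_eq, not_false_iff, if_true, if_false, List.nil_append]
      rw [core_eq (v - Int.sqrt v * Int.sqrt v)]
      rw [pvBLoop_acc _ [_], join_append]
      simp [join_cons, join_nil, String.append_assoc, String.empty_append,
        String.append_empty]
termination_by v.toNat
decreasing_by exact pvRemainder_lt v h

-- ===== VERDICT (by name: the statement is the Claim_ definition above) =====
theorem buildNumber_spec : Claim_equal_buildNumber := by
  intro value isBase _
  unfold Spec_buildNumber buildNumber_alt
  cases isBase with
  | false =>
    simp only [Bool.false_and, if_false, Bool.false_eq_true]
    exact core_eq value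
  | true =>
    by_cases h : value < 10
    · have h10 : ¬ (10 ≤ value) := by omega
      simp only [h10, decide_false, Bool.and_false, if_false, Bool.false_eq_true]
      rw [← core_eq value]
      rw [buildNumber, buildNumber]
      simp [h]
    · have h10 : (10 ≤ value) := by omega
      simp only [h10, decide_true, Bool.and_true, if_true]
      rw [join_append, ← core_eq value]
      rw [buildNumber, buildNumber]
      simp only [h, dite_false]
      simp [join_cons, join_nil, String.append_empty]
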